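-- pv_equiv track=rewrite | github.com/jlsh29/warm-intro-finder | generate_dataset.py | _claim
-- ===== SOURCE A (Python) =====
-- def _claim(used: set[str], base: str) -> str:
--     """Return the first unused handle at or after `base`, suffixing a number if needed."""
--     if base and base not in used:
--         used.add(base)
--         return base
--     n = 2
--     while f"{base}{n}" in used:
--         n += 1
--     claimed = f"{base}{n}"
--     used.add(claimed)
--     return claimed
-- ===== SOURCE B (Python) =====
-- def _claim(used: set[str], base: str) -> str:
--     """Return the first unused handle at or after `base`, suffixing a number if needed."""
--     if base and base not in used:
--         used.add(base)
--         return base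
--     # Candidates base+'2' .. base+str(len(used)+2): by pigeonhole at least one is free.
--     # Invert the search: one pass over `used` marks the taken candidate slots, then the
--     # first unmarked slot is the answer (no repeated membership probing of `used`).
--     limit = len(used) + 3
--     slot = {f"{base}{k}": k - 2 for k in range(2, limit)}
--     taken = [False] * (limit - 2)
--     for s in used:
--         k = slot.get(s)
--         if k is not None:
--             taken[k] = True
--     claimed = f"{base}{2 + taken.index(False)}"
--     used.add(claimed)
--     return claimed
-- ===== Notes on version B (the rewrite author's own statement) =====
-- stated objective: alternative
-- what changed: Inverts the search: instead of probing base2, base3, ... against the set until a free one is found, B precomputes a candidate->slot dict, makes one pass over `used` marking taken slots in a boolean array, and returns the first unmarked slot (pigeonhole bounds the candidate range by len(used)+1).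
import Mathlib
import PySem

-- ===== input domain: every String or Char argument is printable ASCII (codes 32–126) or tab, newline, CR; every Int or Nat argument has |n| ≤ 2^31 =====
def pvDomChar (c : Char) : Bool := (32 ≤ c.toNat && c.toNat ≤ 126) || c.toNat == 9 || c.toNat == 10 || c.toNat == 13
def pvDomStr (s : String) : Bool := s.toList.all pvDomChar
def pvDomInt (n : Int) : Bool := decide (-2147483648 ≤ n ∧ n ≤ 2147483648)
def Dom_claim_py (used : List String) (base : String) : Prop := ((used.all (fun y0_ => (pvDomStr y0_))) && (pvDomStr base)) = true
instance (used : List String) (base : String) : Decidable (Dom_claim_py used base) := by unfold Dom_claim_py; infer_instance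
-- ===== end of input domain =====

-- B inverts A's probe-until-free loop: it precomputes a candidate→slot dict, marks the taken
-- slots in one pass over `used`, and returns the first unmarked slot (alternative algorithm,
-- same cost). In Python both A and B also add the returned handle to the `used` set; the
-- equivalence proved here is about the RETURN value only (B performs the same mutation).

-- ===== PORT A =====
-- A's while-loop `while f"{base}{n}" in used: n += 1`; fuel `used.length + 1` is enough by
-- pigeonhole (proved below), so the fuel-0 branch is never the returned value on real runs.
def claimLoop (used : List String) (base : String) : Int → Nat → String
  | n, 0 => base ++ PySem.Int.toStr n
  | n, f+1 =>
    if PySem.Set.contains used (base ++ PySem.Int.toStr n) then claimLoop used base (n+1) f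
    else base ++ PySem.Int.toStr n

def claim_py (used : List String) (base : String) : String :=
  if base ≠ "" ∧ PySem.Set.contains used base = false then base
  else claimLoop used base 2 (used.length + 1)

-- ===== PORT B =====
-- Source B: `limit = len(used) + 3`, dict comprehension `slot`, boolean list `taken` marked in one
-- pass over `used`, then `2 + taken.index(False)`. `.index(False)` always succeeds (pigeonhole,
-- proved below), so the `.getD 0` totalization of Python's ValueError is never the returned path.
def claim_py_alt (used : List String) (base : String) : String :=
  if base ≠ "" ∧ PySem.Set.contains used base = false then base
  else
    let limit : Int := (used.length : Int) + 3
    let slot : PySem.Dict String Int :=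
      (PySem.List.pyRange 2 limit 1).foldl
        (fun d k => d.insert (base ++ PySem.Int.toStr k) (k - 2)) PySem.Dict.empty
    let taken : List Bool :=
      used.foldl
        (fun t s =>
          match slot.get? s with
          | some k => PySem.List.pySetD t k true
          | none => t)
        (List.replicate (used.length + 1) false)   -- [False] * (limit - 2)
    base ++ PySem.Int.toStr (2 + (((PySem.List.index? taken false).getD 0 : Nat) : Int))

-- ===== PRECONDITION & SPEC =====
def Spec_claim_py (used : List String) (base : String) (out : String) : Prop := out = claim_py_alt used base
instance (used : List String) (base : String) (out : String) : Decidable (Spec_claim_py used base out) := by unfold Spec_claim_py; infer_instance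

-- ===== CLAIM (what is proved, stated in full; the proofs are below) =====
def Claim_equal_claim_py : Prop := ∀ (used : List String) (base : String), Dom_claim_py used base → Spec_claim_py used base (claim_py used base)

-- ===== LEMMAS AND PROOFS =====

-- decimal digits of n, most significant first (spec for Nat.toDigits 10)
def pvDigs (n : ℕ) : List Char :=
  if _h : n < 10 then [Nat.digitChar n]
  else pvDigs (n / 10) ++ [Nat.digitChar (n % 10)]
decreasing_by exact Nat.div_lt_self (by omega) (by norm_num)

theorem pvDigs_lt (n : ℕ) (h : n < 10) : pvDigs n = [Nat.digitChar n] := by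
  rw [pvDigs]; rw [dif_pos h]

theorem pvDigs_ge (n : ℕ) (h : ¬ n < 10) : pvDigs n = pvDigs (n / 10) ++ [Nat.digitChar (n % 10)] := by
  conv_lhs => rw [pvDigs]
  rw [dif_neg h]

theorem pvDigs_ne_nil (n : ℕ) : pvDigs n ≠ [] := by
  by_cases h : n < 10
  · rw [pvDigs_lt n h]; simp
  · rw [pvDigs_ge n h]; simp

theorem pvDigitChar_inj (a b : ℕ) (ha : a < 10) (hb : b < 10) (h : Nat.digitChar a = Nat.digitChar b) : a = b := by
  interval_cases a <;> interval_cases b <;> simp_all [Nat.digitChar]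

theorem pvToDigitsCore_eq (f : ℕ) : ∀ (n : ℕ) (ds : List Char), n < f →
    Nat.toDigitsCore 10 f n ds = pvDigs n ++ ds := by
  induction f with
  | zero => intro n ds h; omega
  | succ f ih =>
    intro n ds h
    rw [Nat.toDigitsCore]
    by_cases h10 : n / 10 = 0
    · simp only [h10, reduceIte]
      rw [pvDigs_lt n (by omega)]
      have hm : n % 10 = n := Nat.mod_eq_of_lt (by omega)
      simp [hm]
    · simp only [h10, reduceIte]
      have hlt : n / 10 < f := by
        have := Nat.div_lt_self (n := n) (by omega) (by norm_num : 1 < 10)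
        omega
      rw [ih (n / 10) _ hlt, pvDigs_ge n (by omega)]
      simp

theorem pvDigs_inj : ∀ (a b : ℕ), pvDigs a = pvDigs b → a = b := by
  intro a
  induction a using Nat.strong_induction_on with
  | _ a ih =>
    intro b h
    by_cases ha : a < 10 <;> by_cases hb : b < 10
    · rw [pvDigs_lt a ha, pvDigs_lt b hb] at h
      exact pvDigitChar_inj a b ha hb (by simpa using h)
    · rw [pvDigs_lt a ha, pvDigs_ge b hb] at h
      obtain ⟨x, xs, hx⟩ := List.exists_cons_of_ne_nil (pvDigs_ne_nil (b / 10))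
      rw [hx] at h
      have := congrArg List.length h
      simp at this
    · rw [pvDigs_ge a ha, pvDigs_lt b hb] at h
      obtain ⟨x, xs, hx⟩ := List.exists_cons_of_ne_nil (pvDigs_ne_nil (a / 10))
      rw [hx] at h
      have := congrArg List.length h
      simp at this
    · rw [pvDigs_ge a ha, pvDigs_ge b hb] at h
      rw [← List.concat_eq_append, ← List.concat_eq_append, List.concat_inj] at h
      obtain ⟨h1, h2⟩ := h
      have hd : a / 10 = b / 10 := ih (a / 10) (Nat.div_lt_self (by omega) (by norm_num)) _ h1
      have hm : a % 10 = b % 10 :=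
        pvDigitChar_inj _ _ (Nat.mod_lt _ (by norm_num)) (Nat.mod_lt _ (by norm_num)) h2
      omega

theorem pvToStr_natCast_inj (a b : ℕ) (h : PySem.Int.toStr (a : ℤ) = PySem.Int.toStr (b : ℤ)) : a = b := by
  have h' : PySem.Int.toChars (a : ℤ) = PySem.Int.toChars (b : ℤ) := by
    rw [← PySem.Int.toList_toStr, ← PySem.Int.toList_toStr, h]
  unfold PySem.Int.toChars at h'
  rw [if_neg (by omega), if_neg (by omega)] at h'
  simp only [Int.toNat_natCast] at h'
  unfold Nat.toDigits at h'
  rw [pvToDigitsCore_eq _ _ _ (by omega), pvToDigitsCore_eq _ _ _ (by omega)] at h'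
  simp only [List.append_nil] at h'
  exact pvDigs_inj a b h'

theorem pvAppend_cancel (base x y : String) (h : base ++ x = base ++ y) : x = y := by
  have : (base ++ x).toList = (base ++ y).toList := by rw [h]
  simp only [String.toList_append] at this
  have := List.append_cancel_left this
  exact String.toList_injective this

theorem pvCand_inj (base : String) (a b : ℕ)
    (h : base ++ PySem.Int.toStr ((a : ℤ) + 2) = base ++ PySem.Int.toStr ((b : ℤ) + 2)) : a = b := by
  have h2 := pvAppend_cancel _ _ _ h
  have ha : ((a : ℤ) + 2) = ((a + 2 : ℕ) : ℤ) := by push_cast; ring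
  have hb : ((b : ℤ) + 2) = ((b + 2 : ℕ) : ℤ) := by push_cast; ring
  rw [ha, hb] at h2
  have := pvToStr_natCast_inj _ _ h2
  omega


-- the j-th numeric candidate handle, j = 0,1,2,… ↦ base2, base3, base4, …
def pvCand (base : String) (j : ℕ) : String := base ++ PySem.Int.toStr ((j : ℤ) + 2)

theorem pvRange_add (a : ℤ) (n : ℕ) :
    PySem.List.pyRange a (a + n) 1 = (List.range n).map (fun j : ℕ => a + (j : ℤ)) := by
  induction n with
  | zero => simp [PySem.List.pyRange]
  | succ n ih =>
    rw [show a + ((n + 1 : ℕ) : ℤ) = (a + (n : ℤ)) + 1 by push_cast; ring]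
    rw [PySem.List.pyRange_one_succ_right (by omega : a ≤ a + (n : ℤ)), ih, List.range_succ]
    simp

-- the candidate→slot dict of B
def pvSlot (used : List String) (base : String) : PySem.Dict String Int :=
  (PySem.List.pyRange 2 ((used.length : ℤ) + 3) 1).foldl
    (fun d k => d.insert (base ++ PySem.Int.toStr k) (k - 2)) PySem.Dict.empty

theorem pvSlot_items (used : List String) (base : String) :
    (pvSlot used base).items =
      (List.range (used.length + 1)).map (fun j => (pvCand base j, (j : ℤ))) := by
  unfold pvSlot
  rw [show ((used.length : ℤ) + 3) = 2 + ((used.length + 1 : ℕ) : ℤ) by push_cast; ring]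
  rw [pvRange_add 2 (used.length + 1)]
  have hfresh : ∀ a ∈ (List.range (used.length + 1)).map (fun j : ℕ => 2 + (j : ℤ)),
      (PySem.Dict.empty : PySem.Dict String Int).contains (base ++ PySem.Int.toStr a) = false := by
    intro a _
    exact PySem.Dict.contains_empty _
  have hnd : (((List.range (used.length + 1)).map (fun j : ℕ => 2 + (j : ℤ))).map
      (fun a : ℤ => base ++ PySem.Int.toStr a)).Nodup := by
    rw [List.map_map]
    refine List.Nodup.map_on ?_ List.nodup_range
    intro a _ b _ h
    refine pvCand_inj base a b ?_
    simp only [Function.comp_apply] at h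
    rw [show ((a : ℤ) + 2) = 2 + (a : ℤ) by ring, show ((b : ℤ) + 2) = 2 + (b : ℤ) by ring]
    exact h
  rw [PySem.Dict.items_foldl_insert_fresh ((List.range (used.length + 1)).map (fun j : ℕ => 2 + (j : ℤ)))
    (fun a : ℤ => base ++ PySem.Int.toStr a) (fun a : ℤ => a - 2) PySem.Dict.empty hfresh hnd]
  have hemp : (PySem.Dict.empty : PySem.Dict String Int).items = [] := rfl
  rw [hemp, List.nil_append, List.map_map]
  apply List.map_congr_left
  intro j _
  simp only [Function.comp_apply, pvCand]
  rw [show (2 : ℤ) + (j : ℤ) = (j : ℤ) + 2 by ring, show ((j : ℤ) + 2 - 2) = (j : ℤ) by ring]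

theorem pvSlot_keys_nodup (used : List String) (base : String) :
    (pvSlot used base).keys.Nodup := by
  unfold pvSlot
  exact PySem.Dict.nodup_keys_foldl_insert_key _ _ _ _ (by simp)

theorem pvSlot_get?_cand (used : List String) (base : String) (j : ℕ) (hj : j < used.length + 1) :
    (pvSlot used base).get? (pvCand base j) = some (j : ℤ) := by
  apply PySem.Dict.get?_of_mem_items _ _ (pvSlot_keys_nodup used base)
  rw [pvSlot_items]
  exact List.mem_map.2 ⟨j, List.mem_range.2 hj, rfl⟩

theorem pvSlot_get?_some (used : List String) (base : String) (s : String) (k : ℤ)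
    (h : (pvSlot used base).get? s = some k) :
    ∃ j : ℕ, j < used.length + 1 ∧ s = pvCand base j ∧ k = (j : ℤ) := by
  have hm := PySem.Dict.mem_items_of_get?_eq_some _ h
  rw [pvSlot_items] at hm
  obtain ⟨j, hj, hje⟩ := List.mem_map.1 hm
  refine ⟨j, List.mem_range.1 hj, ?_, ?_⟩
  · exact (congrArg Prod.fst hje).symm
  · exact (congrArg Prod.snd hje).symm

-- the marking pass of B: one step per element of the remaining list l
theorem pvMark_getElem? (used : List String) (base : String) (l : List String) :
    ∀ (t : List Bool), t.length = used.length + 1 → ∀ (j : ℕ), j < used.length + 1 →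
      (l.foldl (fun t s =>
          match (pvSlot used base).get? s with
          | some k => PySem.List.pySetD t k true
          | none => t) t).length = used.length + 1 ∧
      (l.foldl (fun t s =>
          match (pvSlot used base).get? s with
          | some k => PySem.List.pySetD t k true
          | none => t) t)[j]? =
        some ((t[j]?.getD false) || decide (pvCand base j ∈ l)) := by
  induction l with
  | nil =>
    intro t ht j hj
    simp only [List.foldl_nil]
    refine ⟨ht, ?_⟩
    rw [List.getElem?_eq_getElem (show j < t.length by omega)]
    simp
  | cons s l ih =>
    intro t ht j hj
    simp only [List.foldl_cons]
    rcases hg : (pvSlot used base).get? s with _ | k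
    · obtain ⟨hlen, hget⟩ := ih t ht j hj
      refine ⟨hlen, ?_⟩
      rw [hget]
      have hs : ¬ (pvCand base j = s) := by
        intro he
        rw [← he, pvSlot_get?_cand used base j hj] at hg
        simp at hg
      simp [hs]
    · simp only [hg]
      obtain ⟨j', hj', hsj, hkj⟩ := pvSlot_get?_some used base s k hg
      have hstep : PySem.List.pySetD t k true = t.set j' true := by
        rw [hkj, PySem.List.pySetD_of_nonneg _ _ (by omega)]
        simp
      rw [hstep]
      obtain ⟨hlen, hget⟩ := ih (t.set j' true) (by simp [ht]) j hj
      refine ⟨hlen, ?_⟩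
      rw [hget]
      by_cases hjj : j = j'
      · subst hjj
        rw [List.getElem?_set_self' ]
        have hmem : pvCand base j ∈ s :: l := by rw [hsj]; exact List.mem_cons_self
        simp [ht, hj, hmem]
      · rw [List.getElem?_set_ne (by omega)]
        have hs : ¬ (pvCand base j = s) := by
          intro he
          rw [hsj] at he
          exact hjj (pvCand_inj base j j' he)
        simp [hs]

-- pigeonhole: among the used.length + 1 candidates at least one is not in `used`
theorem pvExists_free (used : List String) (base : String) :
    ∃ j : ℕ, j < used.length + 1 ∧ pvCand base j ∉ used := by
  by_contra hall
  push Not at hall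
  set l := (List.range (used.length + 1)).map (pvCand base) with hl
  have hsub : l ⊆ used := by
    intro c hc
    obtain ⟨j, hj, rfl⟩ := List.mem_map.1 hc
    exact hall j (List.mem_range.1 hj)
  have hnd : l.Nodup := by
    rw [hl]
    refine List.Nodup.map_on ?_ List.nodup_range
    intro a _ b _ h
    exact pvCand_inj base a b h
  have hlen : l.length ≤ used.length :=
    calc l.length = l.toFinset.card := (List.toFinset_card_of_nodup hnd).symm
      _ ≤ used.toFinset.card := Finset.card_le_card (by
          intro x hx; simp only [List.mem_toFinset] at *; exact hsub hx)
      _ ≤ used.length := used.toFinset_card_le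
  have : l.length = used.length + 1 := by simp [hl]
  omega

-- find? returns the first element satisfying the predicate
theorem pvFind?_first {α : Type} (p : α → Bool) :
    ∀ (l : List α) (k : ℕ) (hk : k < l.length), p (l[k]'hk) = true →
      (∀ (i : ℕ) (hi : i < k), p (l[i]'(by omega)) = false) → l.find? p = some (l[k]'hk) := by
  intro l
  induction l with
  | nil => intro k hk; simp at hk
  | cons x xs ih =>
    intro k hk h1 h2
    cases k with
    | zero =>
      rw [List.find?_cons_of_pos (by simpa using h1)]
      simp
    | succ k =>
      have hx : p x = false := h2 0 (by omega)
      rw [List.find?_cons_of_neg (by simp [hx])]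
      have := ih k (by simpa using hk) (by simpa using h1)
        (fun i hi => h2 (i + 1) (by omega))
      simpa using this

-- A's loop, started at m with fuel f, is the candidate scan over m, m+1, …, m+f-1
theorem pvLoop_eq (used : List String) (base : String) (f : ℕ) : ∀ (m : ℕ),
    claimLoop used base (m : ℤ) f =
      (((List.range f).map (fun k : Nat => base ++ PySem.Int.toStr ((m + k : ℕ) : ℤ))).find?
        (fun c => !(PySem.Set.contains used c))).getD (base ++ PySem.Int.toStr ((m + f : ℕ) : ℤ)) := by
  induction f with
  | zero => intro m; simp [claimLoop]
  | succ f ih =>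
    intro m
    rw [claimLoop, List.range_succ_eq_map, List.map_cons, List.map_map]
    by_cases hc : PySem.Set.contains used (base ++ PySem.Int.toStr ((m : ℤ))) = true
    · rw [if_pos hc]
      rw [List.find?_cons_of_neg (by simpa using hc)]
      have hcast : ((m : ℤ) + 1) = ((m + 1 : ℕ) : ℤ) := by push_cast; ring
      rw [hcast, ih (m + 1)]
      have hfun : ((List.range f).map (fun k : Nat => base ++ PySem.Int.toStr ((m + 1 + k : ℕ) : ℤ))) =
          (List.range f).map ((fun k : Nat => base ++ PySem.Int.toStr ((m + k : ℕ) : ℤ)) ∘ Nat.succ) := by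
        apply List.map_congr_left
        intro k _
        simp only [Function.comp_apply]
        have : m + 1 + k = m + Nat.succ k := by omega
        rw [this]
      rw [hfun]
      have : m + 1 + f = m + (f + 1) := by omega
      rw [this]
    · rw [if_neg hc]
      rw [List.find?_cons_of_pos (by simpa using hc)]
      simp

-- ===== VERDICT (by name: the statement is the Claim_ definition above) =====
theorem claim_py_spec : Claim_equal_claim_py := by
  intro used base _
  unfold Spec_claim_py
  have hBalt : claim_py_alt used base =
      (if base ≠ "" ∧ PySem.Set.contains used base = false then base
       else base ++ PySem.Int.toStr (2 +
         (((PySem.List.index?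
             (used.foldl (fun t s =>
                 match (pvSlot used base).get? s with
                 | some k => PySem.List.pySetD t k true
                 | none => t) (List.replicate (used.length + 1) false)) false).getD 0 : ℕ) : ℤ))) := rfl
  rw [hBalt]
  unfold claim_py
  by_cases hb : base ≠ "" ∧ PySem.Set.contains used base = false
  · rw [if_pos hb, if_pos hb]
  · rw [if_neg hb, if_neg hb]
    set taken := used.foldl (fun t s =>
        match (pvSlot used base).get? s with
        | some k => PySem.List.pySetD t k true
        | none => t) (List.replicate (used.length + 1) false) with htk
    have htaken := pvMark_getElem? used base used (List.replicate (used.length + 1) false) (by simp)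
    have htj : ∀ (j : ℕ), j < used.length + 1 →
        taken[j]? = some (decide (pvCand base j ∈ used)) := by
      intro j hj
      obtain ⟨_, hget⟩ := htaken j hj
      rw [htk, hget]
      rw [List.getElem?_replicate_of_lt (by omega)]
      simp
    have hlen : taken.length = used.length + 1 := (htaken 0 (by omega)).1
    obtain ⟨jf, hjf, hjfree⟩ := pvExists_free used base
    have hfalse_mem : false ∈ taken := by
      have := htj jf hjf
      rw [decide_eq_false hjfree] at this
      exact List.mem_of_getElem? this
    obtain ⟨j0, hidx⟩ : ∃ j0, PySem.List.index? taken false = some j0 := by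
      rcases h : PySem.List.index? taken false with _ | j0
      · exact absurd hfalse_mem ((PySem.List.index?_eq_none_iff taken false).1 h)
      · exact ⟨j0, rfl⟩
    obtain ⟨hj0len, hj0v, hj0min⟩ := PySem.List.getElem_of_index?_eq_some hidx
    have hj0m : j0 < used.length + 1 := by omega
    have hfree0 : pvCand base j0 ∉ used := by
      have := htj j0 hj0m
      rw [List.getElem?_eq_getElem hj0len, hj0v] at this
      have := Option.some.inj this
      exact of_decide_eq_false this.symm
    have htaken0 : ∀ (i : ℕ), i < j0 → pvCand base i ∈ used := by
      intro i hi
      have hlt : i < taken.length := by omega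
      have hne := hj0min i hi
      have := htj i (by omega)
      rw [List.getElem?_eq_getElem hlt] at this
      have hv := Option.some.inj this
      rcases hbv : taken[i] with _ | _
      · exact absurd hbv hne
      · rw [hbv] at hv
        exact of_decide_eq_true hv.symm
    -- A's loop equals the first free candidate
    have hA : claimLoop used base 2 (used.length + 1) = pvCand base j0 := by
      have h2 : ((2 : ℕ) : ℤ) = (2 : ℤ) := by norm_num
      have hloop := pvLoop_eq used base (used.length + 1) 2
      rw [h2] at hloop
      rw [hloop]
      have hfun : ((List.range (used.length + 1)).map (fun k : Nat => base ++ PySem.Int.toStr ((2 + k : ℕ) : ℤ))) =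
          (List.range (used.length + 1)).map (pvCand base) := by
        apply List.map_congr_left
        intro k _
        simp only [pvCand]
        congr 1
        congr 1
        push_cast
        ring
      rw [hfun]
      set cl := (List.range (used.length + 1)).map (pvCand base) with hcl
      have hcll : cl.length = used.length + 1 := by simp [hcl]
      have hclget : ∀ (i : ℕ) (hi : i < used.length + 1), cl[i]'(by omega) = pvCand base i := by
        intro i hi
        simp [hcl]
      rw [pvFind?_first _ cl j0 (by omega)
        (by
          rw [hclget j0 hj0m]
          show (!PySem.Set.contains used (pvCand base j0)) = true
          have hcf : PySem.Set.contains used (pvCand base j0) = false := by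
            rcases h : PySem.Set.contains used (pvCand base j0) with _ | _
            · rfl
            · exact absurd ((PySem.Set.contains_iff used _).1 h) hfree0
          rw [hcf]
          rfl)
        (by
          intro i hi
          rw [hclget i (by omega)]
          show (!PySem.Set.contains used (pvCand base i)) = false
          rw [(PySem.Set.contains_iff used _).2 (htaken0 i hi)]
          rfl)]
      rw [Option.getD_some, hclget j0 hj0m]
    rw [hA, hidx, Option.getD_some]
    simp only [pvCand]
    congr 1
    congr 1
    push_cast
    ring
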